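-- pv_equiv track=rewrite | github.com/cloud-bulldozer/orion | pkg/isolationForest.py | insert_multiple
-- ===== SOURCE A (Python) =====
-- from typing import List
--
-- def insert_multiple(
--     col: List[str], new_items: List[str], positions: List[int]
-- ) -> List[str]:
--     """Inserts an item into a collection at given positions"""
--     result = []
--     positions = set(positions)
--     new_items_iter = iter(new_items)
--     for i, x in enumerate(col):
--         if i in positions:
--             result.append(next(new_items_iter))
--         result.append(x)
--     return result
-- ===== SOURCE B (Python) =====
-- def insert_multiple(col, new_items, positions):
--     """Inserts an item into a collection at given positions"""
--     valid = sorted({p for p in positions if 0 <= p < len(col)})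
--     result = list(col)
--     it = iter(new_items)
--     for offset, pos in enumerate(valid):
--         result.insert(pos + offset, next(it))
--     return result
-- ===== Notes on version B (the rewrite author's own statement) =====
-- stated objective: alternative
-- what changed: Instead of one interleaving pass over col testing each index against a set, B sorts the distinct in-range positions and performs offset-corrected list.insert calls into a copy of col.
import Mathlib
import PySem

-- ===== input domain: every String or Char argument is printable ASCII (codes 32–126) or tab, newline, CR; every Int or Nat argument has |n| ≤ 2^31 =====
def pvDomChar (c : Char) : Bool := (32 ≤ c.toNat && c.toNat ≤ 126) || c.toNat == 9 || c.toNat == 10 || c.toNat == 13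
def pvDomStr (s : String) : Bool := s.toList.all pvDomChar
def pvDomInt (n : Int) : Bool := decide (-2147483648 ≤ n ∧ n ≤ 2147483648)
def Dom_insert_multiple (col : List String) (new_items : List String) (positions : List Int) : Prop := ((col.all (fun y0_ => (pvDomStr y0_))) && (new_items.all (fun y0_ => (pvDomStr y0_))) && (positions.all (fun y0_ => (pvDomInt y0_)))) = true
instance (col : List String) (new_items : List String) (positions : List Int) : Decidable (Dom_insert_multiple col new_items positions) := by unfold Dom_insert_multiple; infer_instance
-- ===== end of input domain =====

-- B replaces A's single interleaving pass (index-in-set test per element) by sorting the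
-- distinct in-range positions and doing offset-corrected inserts into a copy of col.

-- ===== PORT A =====
-- the for-loop over enumerate(col): i is the running index, items the not-yet-consumed iterator
def amLoop (pset : PySem.Set Int) : List String → List String → Int → List String
  | [], _, _ => []
  | x :: xs, items, i =>
    if PySem.Set.contains pset i then
      match items with
      | [] => []  -- next() raises StopIteration here; excluded by Pre_
      | n :: items' => n :: x :: amLoop pset xs items' (i + 1)
    else x :: amLoop pset xs items (i + 1)

def insert_multiple (col : List String) (new_items : List String) (positions : List Int) : List String :=
  amLoop (PySem.Set.ofList positions) col new_items 0

-- ===== PORT B =====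
-- the for-loop over enumerate(valid): offset-corrected insert into the evolving result
def bLoop : List Int → Int → List String → List String → List String
  | [], _, _, result => result
  | pos :: rest, offset, items, result =>
    match items with
    | [] => result  -- next() raises StopIteration here; excluded by Pre_
    | n :: items' => bLoop rest (offset + 1) items' (PySem.List.insert result (pos + offset) n)

def insert_multiple_alt (col : List String) (new_items : List String) (positions : List Int) : List String :=
  let valid := PySem.List.sorted (PySem.Set.ofList (positions.filter
    (fun p => decide (0 ≤ p) && decide (p < (col.length : Int))))) (fun x => x) false
  bLoop valid 0 new_items col

-- ===== PRECONDITION & SPEC =====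
-- Pre_ excludes exactly the inputs on which A raises StopIteration (more distinct in-range
-- positions than new_items); B raises StopIteration there as well.
def Pre_insert_multiple (col : List String) (new_items : List String) (positions : List Int) : Prop :=
  (PySem.List.dedup (positions.filter
    (fun p => decide (0 ≤ p) && decide (p < (col.length : Int))))).length ≤ new_items.length
instance (col : List String) (new_items : List String) (positions : List Int) : Decidable (Pre_insert_multiple col new_items positions) := by unfold Pre_insert_multiple; infer_instance

def pvWitness_insert_multiple : List String × List String × List Int := (["a", "b", "c"], ["X", "Y"], [2, 0, 2])

def Spec_insert_multiple (col : List String) (new_items : List String) (positions : List Int) (out : List String) : Prop := out = insert_multiple_alt col new_items positions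
instance (col : List String) (new_items : List String) (positions : List Int) (out : List String) : Decidable (Spec_insert_multiple col new_items positions out) := by unfold Spec_insert_multiple; infer_instance

-- ===== CLAIM (what is proved, stated in full; the proofs are below) =====
def Claim_equal_insert_multiple : Prop := ∀ (col : List String) (new_items : List String) (positions : List Int), Dom_insert_multiple col new_items positions → Pre_insert_multiple col new_items positions → Spec_insert_multiple col new_items positions (insert_multiple col new_items positions)

-- ===== LEMMAS AND PROOFS =====

-- the in-range hit positions of pset, RELATIVE to base index i, in increasing order
def relIdx (pset : PySem.Set Int) (i : Int) : Nat → List Int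
  | 0 => []
  | n + 1 => (if PySem.Set.contains pset i then [(0 : Int)] else []) ++ (relIdx pset (i + 1) n).map (· + 1)

theorem mem_relIdx (pset : PySem.Set Int) (i : Int) (n : Nat) (p : Int) :
    p ∈ relIdx pset i n ↔ 0 ≤ p ∧ p < (n : Int) ∧ PySem.Set.contains pset (i + p) = true := by
  induction n generalizing i p with
  | zero => simp [relIdx]; omega
  | succ n ih =>
    simp only [relIdx, List.mem_append, List.mem_map]
    constructor
    · rintro (h | ⟨q, hq, rfl⟩)
      · split at h
        · rename_i hc
          simp at h; subst h
          exact ⟨le_refl 0, by positivity, by simpa using hc⟩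
        · simp at h
      · rcases (ih (i + 1) q).1 hq with ⟨h1, h2, h3⟩
        refine ⟨by omega, by push_cast; omega, by rwa [show i + (q + 1) = i + 1 + q by ring]⟩
    · rintro ⟨h1, h2, h3⟩
      by_cases hp : p = 0
      · subst hp; simp at h3; simp [h3]
      · right
        refine ⟨p - 1, (ih (i + 1) (p - 1)).2 ⟨by omega, by push_cast at h2 ⊢; omega,
          by rwa [show i + 1 + (p - 1) = i + p by ring]⟩, by ring⟩

theorem pairwise_relIdx (pset : PySem.Set Int) (i : Int) (n : Nat) :
    (relIdx pset i n).Pairwise (· < ·) := by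
  induction n generalizing i with
  | zero => simp [relIdx]
  | succ n ih =>
    have hmap : ((relIdx pset (i + 1) n).map (· + 1)).Pairwise (fun a b : Int => a < b) := by
      rw [List.pairwise_map]
      exact (ih (i + 1)).imp (by intro a b h; omega)
    unfold relIdx
    split
    · refine List.pairwise_cons.2 ⟨?_, hmap⟩
      intro b hb
      rcases List.mem_map.1 hb with ⟨q, hq, rfl⟩
      have := (mem_relIdx pset (i + 1) n q).1 hq
      omega
    · simpa using hmap

theorem length_relIdx_succ (pset : PySem.Set Int) (i : Int) (n : Nat) :
    (relIdx pset i (n + 1)).length =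
      (if PySem.Set.contains pset i then 1 else 0) + (relIdx pset (i + 1) n).length := by
  rw [relIdx]
  split
  · simp; omega
  · simp

-- bLoop only ever uses pos + offset: shifting every position by 1 = shifting the offset
theorem bLoop_map_add_one (r : List Int) (off : Int) (items result : List String) :
    bLoop (r.map (· + 1)) off items result = bLoop r (off + 1) items result := by
  induction r generalizing off items result with
  | nil => rfl
  | cons p rest ih =>
    cases items with
    | nil => rfl
    | cons n items' =>
      simp only [List.map_cons, bLoop]
      rw [show p + 1 + off = p + (off + 1) by ring, ih]

-- peeling the head of the working list when every insert lands strictly after it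
theorem bLoop_cons (r : List Int) (off : Int) (items : List String) (a : String) (l : List String)
    (hoff : 1 ≤ off) (hr : ∀ p ∈ r, 0 ≤ p ∧ p + off ≤ (l.length : Int) + 1) :
    bLoop r off items (a :: l) = a :: bLoop r (off - 1) items l := by
  induction r generalizing off items l with
  | nil => rfl
  | cons p rest ih =>
    cases items with
    | nil => rfl
    | cons n items' =>
      have hp := hr p (by simp)
      obtain ⟨k, hk⟩ : ∃ k : Nat, p + off = (k : Int) + 1 := ⟨(p + off - 1).toNat, by omega⟩
      have hk1 : (k : Int) + 1 ≤ ((a :: l).length : Int) := by simp; omega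
      have hk2 : k ≤ l.length := by omega
      simp only [bLoop]
      rw [hk, show ((k : Int) + 1) = ((k + 1 : Nat) : Int) by push_cast; ring,
        PySem.List.insert_natCast _ _ _ (by simpa using hk1)]
      simp only [List.take_succ_cons, List.drop_succ_cons, List.cons_append]
      rw [← PySem.List.insert_natCast l k n hk2]
      rw [ih (off + 1) items' (PySem.List.insert l (↑k) n) (by omega) ?bound]
      · rw [show off + 1 - 1 = off - 1 + 1 by ring, show (k : Int) = p + (off - 1) by omega]
      case bound =>
        intro q hq
        have := hr q (by simp [hq])
        rw [PySem.List.length_insert]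
        push_cast; omega

-- MAIN: B's sorted-insert loop over the relative hit positions equals A's interleaving pass
theorem bLoop_relIdx_eq_amLoop (col : List String) :
    ∀ (items : List String) (i : Int) (pset : PySem.Set Int),
      (relIdx pset i col.length).length ≤ items.length →
      bLoop (relIdx pset i col.length) 0 items col = amLoop pset col items i := by
  induction col with
  | nil => intro items i pset _; simp [relIdx, bLoop, amLoop]
  | cons x xs ih =>
    intro items i pset hlen
    have hb : ∀ p ∈ relIdx pset (i + 1) xs.length, 0 ≤ p ∧ p < (xs.length : Int) := by
      intro p hp
      have := (mem_relIdx pset (i + 1) xs.length p).1 hp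
      exact ⟨this.1, this.2.1⟩
    rw [show (x :: xs).length = xs.length + 1 from rfl] at hlen ⊢
    rw [length_relIdx_succ] at hlen
    unfold relIdx amLoop
    split
    · -- i ∈ pset : consume one item, insert at relative position 0
      rename_i hc
      rw [if_pos hc] at hlen
      cases items with
      | nil => exact absurd hlen (by simp)
      | cons n items' =>
        simp only [List.singleton_append, bLoop, PySem.List.insert_zero, zero_add]
        rw [bLoop_map_add_one,
          bLoop_cons _ _ _ _ _ (by omega)
            (by intro p hp; have := hb p hp; simp; omega)]
        rw [show (1 : Int) + 1 - 1 = 1 by ring,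
          bLoop_cons _ _ _ _ _ (by omega)
            (by intro p hp; have := hb p hp; omega)]
        rw [show (1 : Int) - 1 = 0 by ring, ih items' (i + 1) pset (by simp at hlen; omega)]
    · -- i ∉ pset : just keep x
      simp only [List.nil_append]
      rw [bLoop_map_add_one,
        bLoop_cons _ _ _ _ _ (by omega) (by intro p hp; have := hb p hp; omega)]
      rw [show (0 : Int) + 1 - 1 = 0 by ring, ih items (i + 1) pset ?lenok]
      case lenok =>
        rename_i hc
        rw [if_neg hc] at hlen
        omega

-- B's "valid" list IS relIdx of the position set at base 0
theorem valid_eq_relIdx (col : List String) (positions : List Int) :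
    PySem.List.sorted (PySem.Set.ofList (positions.filter
        (fun p => decide (0 ≤ p) && decide (p < (col.length : Int))))) (fun x => x) false
      = relIdx (PySem.Set.ofList positions) 0 col.length := by
  apply PySem.List.sorted_eq_of_perm_of_pairwise_lt
  · apply (List.perm_ext_iff_of_nodup ?_ ?_).2
    · intro p
      rw [mem_relIdx, PySem.Set.mem_ofList, List.mem_filter]
      have : PySem.Set.contains (PySem.Set.ofList positions) (0 + p) = true ↔ p ∈ positions := by
        simp [PySem.Set.contains, PySem.Set.mem_ofList]
      rw [this]
      simp; tauto
    · exact (pairwise_relIdx _ _ _).nodup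
    · exact PySem.Set.nodup_ofList _
  · exact pairwise_relIdx _ _ _

-- ===== VERDICT (by name: the statement is the Claim_ definition above) =====
theorem insert_multiple_spec : Claim_equal_insert_multiple := by
  intro col new_items positions _ hpre
  unfold Spec_insert_multiple insert_multiple insert_multiple_alt
  rw [valid_eq_relIdx]
  refine (bLoop_relIdx_eq_amLoop col new_items 0 (PySem.Set.ofList positions) ?_).symm
  unfold Pre_insert_multiple at hpre
  calc (relIdx (PySem.Set.ofList positions) 0 col.length).length
      = (PySem.List.sorted (PySem.Set.ofList (positions.filter
          (fun p => decide (0 ≤ p) && decide (p < (col.length : Int))))) (fun x => x) false).length := by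
        rw [valid_eq_relIdx]
    _ ≤ new_items.length := by
        rw [PySem.List.length_sorted, ← PySem.List.dedup_eq_ofList]; exact hpre
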